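-- pv_equiv track=rewrite | github.com/DanielYeung0131/Engineering-102 | chapter_9/word_puzzle.py | is_valid_guess
-- ===== SOURCE A (Python) =====
-- def get_valid_letters(s):
--     a = ''
--     alphabet = 'ABCDEFGHIJKLMNOPQRSTUVWXYZ'
--     for i in s:
--         if i in a:
--             continue
--         else:
--             if i in alphabet:
--                 a += i
--         if len(a) == 10:
--             break
--     return a
--
-- def is_valid_guess(s1, s2):
--     a = get_valid_letters(s1)
--     b = s2
--
--     if len(b) != 10:
--         return False
--
--     l1 = list(a)
--     l2 = list(b)
--
--     for i in b:
--         count = 0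
--         for j in range(len(b)):
--             if i == b[j]:
--                 count+=1
--             if count>1:
--                 return False
--
--     for j in b:
--         if j in a:
--             del l1[l1.index(j)]
--             del l2[l2.index(j)]
--
--     if l1 == [] and l2 == []:
--         return True
--     else:
--         return False
-- ===== SOURCE B (Python) =====
-- def get_valid_letters(s):
--     a = ''
--     alphabet = 'ABCDEFGHIJKLMNOPQRSTUVWXYZ'
--     for i in s:
--         if i in a:
--             continue
--         else:
--             if i in alphabet:
--                 a += i
--         if len(a) == 10:
--             break
--     return a
--
-- def is_valid_guess(s1, s2):
--     if len(s2) != 10: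
--         return False
--     if len(set(s2)) != 10:
--         return False
--     return set(s2) == set(get_valid_letters(s1))
-- ===== Notes on version B (the rewrite author's own statement) =====
-- stated objective: simpler
-- what changed: Replaced A's nested O(n^2) duplicate-counting loop and its copy-both-lists-then-delete-matched-elements pass by direct set construction (len(set(s2))==10 for distinctness, set equality against the valid letters), and the guess-length/distinctness checks now run before s1 is scanned.
import Mathlib
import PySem

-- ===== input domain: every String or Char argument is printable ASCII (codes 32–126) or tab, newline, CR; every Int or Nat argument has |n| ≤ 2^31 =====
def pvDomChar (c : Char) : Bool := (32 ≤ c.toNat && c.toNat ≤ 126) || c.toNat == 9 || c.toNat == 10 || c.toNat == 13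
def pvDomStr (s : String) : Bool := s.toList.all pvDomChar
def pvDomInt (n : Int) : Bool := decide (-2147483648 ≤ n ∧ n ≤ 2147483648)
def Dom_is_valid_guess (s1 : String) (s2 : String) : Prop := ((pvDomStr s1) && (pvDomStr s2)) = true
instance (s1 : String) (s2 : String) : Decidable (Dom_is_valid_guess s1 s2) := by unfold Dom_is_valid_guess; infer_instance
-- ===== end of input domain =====

-- B replaces A's nested duplicate-counting loop and its copy-both-lists-then-delete pass by a
-- direct set-equality check (simpler); both programs' return values are proved equal everywhere.

-- ===== PORT A =====
-- shared helper get_valid_letters (identical in Source A and Source B)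
def pvAlphabet : List Char := "ABCDEFGHIJKLMNOPQRSTUVWXYZ".toList

def getValidLettersGo : List Char → List Char → List Char
  | [], a => a
  | i :: rest, a =>
    if i ∈ a then getValidLettersGo rest a
    else
      let a' := if i ∈ pvAlphabet then a ++ [i] else a
      if a'.length = 10 then a' else getValidLettersGo rest a'

def get_valid_letters (s : List Char) : List Char := getValidLettersGo s []

-- inner loop 'for j in range(len(b)): if i == b[j]: count+=1; if count>1: return False'
def dupInner : List Char → Char → Nat → Bool
  | [], _, _ => false
  | j :: rest, i, count =>
    let c := if i = j then count + 1 else count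
    if c > 1 then true else dupInner rest i c

-- outer loop 'for i in b: …' (true = some char occurs twice, i.e. A returns False)
def dupLoop : List Char → List Char → Bool
  | [], _ => false
  | i :: rest, b => if dupInner b i 0 then true else dupLoop rest b

-- 'for j in b: if j in a: del l1[l1.index(j)]; del l2[l2.index(j)]'
-- 'del l[l.index(j)]' removes the first occurrence of j; ported with PySem.List.remove?,
-- exact here because whenever the branch is taken j is present in both lists (b is duplicate-free).
def delLoop : List Char → List Char → List Char → List Char → List Char × List Char
  | [], _, l1, l2 => (l1, l2)
  | j :: rest, a, l1, l2 =>
    if j ∈ a then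
      delLoop rest a ((PySem.List.remove? l1 j).getD l1) ((PySem.List.remove? l2 j).getD l2)
    else delLoop rest a l1 l2

def is_valid_guess (s1 : String) (s2 : String) : Bool :=
  let a := get_valid_letters s1.toList
  let b := s2.toList
  if b.length ≠ 10 then false
  else if dupLoop b b then false
  else
    let p := delLoop b a a b
    decide (p.1 = [] ∧ p.2 = [])

-- ===== PORT B =====
def is_valid_guess_alt (s1 : String) (s2 : String) : Bool :=
  if s2.toList.length ≠ 10 then false
  else if PySem.Set.len (PySem.Set.ofList s2.toList) ≠ 10 then false
  else PySem.Set.equal (PySem.Set.ofList s2.toList)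
         (PySem.Set.ofList (get_valid_letters s1.toList))

-- ===== PRECONDITION & SPEC =====
def Spec_is_valid_guess (s1 : String) (s2 : String) (out : Bool) : Prop := out = is_valid_guess_alt s1 s2
instance (s1 : String) (s2 : String) (out : Bool) : Decidable (Spec_is_valid_guess s1 s2 out) := by unfold Spec_is_valid_guess; infer_instance

-- ===== CLAIM (what is proved, stated in full; the proofs are below) =====
def Claim_equal_is_valid_guess : Prop := ∀ (s1 : String) (s2 : String), Dom_is_valid_guess s1 s2 → Spec_is_valid_guess s1 s2 (is_valid_guess s1 s2)

-- ===== LEMMAS AND PROOFS =====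

-- get_valid_letters keeps its accumulator duplicate-free
lemma gvl_nodup (cs : List Char) (a : List Char) (h : a.Nodup) :
    (getValidLettersGo cs a).Nodup := by
  induction cs generalizing a with
  | nil => simpa [getValidLettersGo] using h
  | cons i rest ih =>
    have hstep : i ∉ a → (a ++ [i]).Nodup := fun h1 =>
      ((List.perm_append_singleton i a).nodup_iff).mpr (List.nodup_cons.mpr ⟨h1, h⟩)
    simp only [getValidLettersGo]
    split_ifs with h1 h2 h3
    · exact ih a h
    · exact hstep h1
    · exact ih _ (hstep h1)
    · exact h
    · exact ih a h

lemma dupInner_eq (l : List Char) (i : Char) (c : Nat) (hc : c ≤ 1) :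
    dupInner l i c = decide (c + l.count i > 1) := by
  induction l generalizing c with
  | nil => simp [dupInner]; omega
  | cons j rest ih =>
    simp only [dupInner]
    by_cases hij : i = j
    · subst hij
      by_cases h1 : c + 1 > 1
      · have : c = 1 := by omega
        subst this
        simp [List.count_cons_self]
      · have : c = 0 := by omega
        subst this
        rw [if_pos rfl, if_neg h1, ih (0 + 1) (by omega), List.count_cons_self,
          decide_eq_decide]
        omega
    · simp [hij, List.count_cons_of_ne (fun h => hij h.symm),
        Nat.not_lt.mpr hc, ih c hc]

lemma dupLoop_eq (l b : List Char) :
    dupLoop l b = l.any (fun i => decide (b.count i > 1)) := by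
  induction l with
  | nil => simp [dupLoop]
  | cons i rest ih =>
    simp only [dupLoop, dupInner_eq b i 0 (by omega), List.any_cons, ih]
    by_cases h : b.count i > 1 <;> simp [h]

lemma dupLoop_self_eq (b : List Char) : dupLoop b b = !decide b.Nodup := by
  rw [dupLoop_eq]
  by_cases h : b.Nodup
  · simp only [h, decide_true, Bool.not_true, List.any_eq_false]
    intro i _
    simp [Nat.not_lt.mpr (List.nodup_iff_count_le_one.mp h i)]
  · simp only [h, decide_false, Bool.not_false, List.any_eq_true]
    by_contra hno
    apply h
    rw [List.nodup_iff_count_le_one]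
    intro x
    by_contra hx
    exact hno ⟨x, List.count_pos_iff.mp (by omega), by simpa using by omega⟩

-- 'del l[l.index(j)]' = erase the first occurrence (identity when absent: then Python would raise,
-- which is unreachable in A's loop)
lemma removeD_eq_erase (l : List Char) (j : Char) :
    (PySem.List.remove? l j).getD l = l.erase j := by
  by_cases h : j ∈ l
  · rw [PySem.List.remove?_eq_some_erase l j h]; rfl
  · rw [(PySem.List.remove?_eq_none_iff l j).mpr h, List.erase_of_not_mem h]; rfl

lemma delLoop_eq (bs a l1 l2 : List Char) (h1 : l1.Nodup) (h2 : l2.Nodup) :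
    delLoop bs a l1 l2 =
      (l1.filter (fun x => !(decide (x ∈ bs) && decide (x ∈ a))),
       l2.filter (fun x => !(decide (x ∈ bs) && decide (x ∈ a)))) := by
  induction bs generalizing l1 l2 with
  | nil => simp [delLoop]
  | cons j rest ih =>
    simp only [delLoop]
    by_cases hja : j ∈ a
    · simp only [hja, if_true, removeD_eq_erase]
      rw [ih _ _ (h1.erase j) (h2.erase j), h1.erase_eq_filter, h2.erase_eq_filter,
        List.filter_filter, List.filter_filter]
      simp only [Prod.mk.injEq]
      constructor <;>
        · apply List.filter_congr
          intro x _
          by_cases hx : x = j <;> simp [hx, hja]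
    · simp only [hja, if_false]
      rw [ih _ _ h1 h2]
      simp only [Prod.mk.injEq]
      constructor <;>
        · apply List.filter_congr
          intro x _
          by_cases hx : x = j <;> simp [hx, hja]

-- PySem.Set.ofList xs keeps first occurrences, hence is a sublist of xs
lemma ofList_sublist (xs : List Char) : (PySem.Set.ofList xs).Sublist xs := by
  induction xs with
  | nil => simp
  | cons x rest ih =>
    rw [PySem.Set.ofList_cons]
    have hd : (PySem.Set.discard (PySem.Set.ofList rest) x).Sublist (PySem.Set.ofList rest) :=
      List.filter_sublist
    exact List.Sublist.cons₂ x (hd.trans ih)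

lemma ofList_len_eq_iff (xs : List Char) :
    (PySem.Set.ofList xs).length = xs.length ↔ xs.Nodup := by
  constructor
  · intro h
    have := (ofList_sublist xs).eq_of_length h
    rw [← this]; exact PySem.Set.nodup_ofList xs
  · intro h; rw [PySem.Set.ofList_eq_self_of_nodup xs h]

-- ===== VERDICT (by name: the statement is the Claim_ definition above) =====
theorem is_valid_guess_spec : Claim_equal_is_valid_guess := by
  intro s1 s2 _
  unfold Spec_is_valid_guess is_valid_guess is_valid_guess_alt
  set a := get_valid_letters s1.toList with ha
  set b := s2.toList with hb
  by_cases hlen : b.length ≠ 10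
  · simp [hlen]
  · simp only [ne_eq, not_not] at hlen
    simp only [hlen, ne_eq, not_true_eq_false, if_false]
    rw [dupLoop_self_eq]
    by_cases hnd : b.Nodup
    · rw [PySem.Set.ofList_eq_self_of_nodup b hnd]
      simp only [hnd, decide_true, Bool.not_true, Bool.false_eq_true, if_false,
        PySem.Set.len, hlen, Nat.cast_ofNat, ne_eq, not_true_eq_false]
      have hand : a.Nodup := gvl_nodup _ _ List.nodup_nil
      rw [delLoop_eq b a a b hand hnd]
      have hiff : ((a.filter (fun x => !(decide (x ∈ b) && decide (x ∈ a))) = [] ∧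
          b.filter (fun x => !(decide (x ∈ b) && decide (x ∈ a))) = []) ↔
          (∀ x, x ∈ b ↔ x ∈ a)) := by
        simp only [List.filter_eq_nil_iff]
        constructor
        · rintro ⟨hA, hB⟩ x
          constructor
          · intro hxb
            have := hB x hxb
            simp [hxb] at this
            exact this
          · intro hxa
            have := hA x hxa
            simp [hxa] at this
            exact this
        · intro h
          constructor
          · intro x hxa; simp [hxa, (h x).mpr hxa]
          · intro x hxb; simp [hxb, (h x).mp hxb]
      cases hE : PySem.Set.equal b (PySem.Set.ofList a) with
      | true =>
        simp only [decide_eq_true_eq]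
        refine hiff.mpr ?_
        intro x
        have := (PySem.Set.equal_iff _ _).mp hE x
        simpa [PySem.Set.mem_ofList] using this
      | false =>
        simp only [decide_eq_false_iff_not]
        intro hcon
        rw [(PySem.Set.equal_iff _ _).mpr
          (by intro x; simpa [PySem.Set.mem_ofList] using hiff.mp hcon x)] at hE
        simp at hE
    · simp only [hnd, decide_false, Bool.not_false, if_true]
      have hne : (PySem.Set.ofList b).length ≠ 10 := fun hc =>
        hnd ((ofList_len_eq_iff b).mp (by omega))
      simp only [PySem.Set.len]
      rw [if_pos (fun hc => hne (by exact_mod_cast hc))]
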